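-- pv_equiv track=rewrite | github.com/PedroMTQ/RIP | Binning_refiner/source/Binning_Refinement.py | get_valid_contigs_per_candidate
-- ===== SOURCE A (Python) =====
-- def get_valid_contigs_per_candidate(set_annotations,unassigned_reactions):
--     valid_contigs=set()
--     for contig_id in unassigned_reactions:
--         valid_contig=True
--         for seq_id in unassigned_reactions[contig_id]:
--             for id_type_annot_id in unassigned_reactions[contig_id][seq_id]:
--                 #we only add contigs which could be missing in the bins
--                 if  id_type_annot_id in set_annotations:
--                     valid_contig=False
--                 #if id_type_annot_id.startswith('enzyme_ec') and id_type_annot_id in set_annotations: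
--                 #    valid_contig=False
--         if valid_contig: valid_contigs.add(contig_id)
--     return valid_contigs
-- ===== SOURCE B (Python) =====
-- def get_valid_contigs_per_candidate(set_annotations, unassigned_reactions):
--     # Inverted index: annotation id -> set of contig ids that carry it.
--     index = {}
--     for contig_id in unassigned_reactions:
--         for seq_id in unassigned_reactions[contig_id]:
--             for id_type_annot_id in unassigned_reactions[contig_id][seq_id]:
--                 index.setdefault(id_type_annot_id, set()).add(contig_id)
--     # Union the buckets of the flagged annotations: these contigs are invalid.
--     invalid = set()
--     for annot in set_annotations:
--         invalid.update(index.get(annot, ()))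
--     # Everything else is valid.
--     return {contig_id for contig_id in unassigned_reactions if contig_id not in invalid}
-- ===== Notes on version B (the rewrite author's own statement) =====
-- stated objective: alternative
-- what changed: Inverts the computation: builds an inverted index from annotation id to the set of contigs carrying it, unions the index buckets of set_annotations into one 'invalid' set, and returns the contigs outside it, instead of A's per-contig flag toggled by scanning every annotation against set_annotations.
import Mathlib
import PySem

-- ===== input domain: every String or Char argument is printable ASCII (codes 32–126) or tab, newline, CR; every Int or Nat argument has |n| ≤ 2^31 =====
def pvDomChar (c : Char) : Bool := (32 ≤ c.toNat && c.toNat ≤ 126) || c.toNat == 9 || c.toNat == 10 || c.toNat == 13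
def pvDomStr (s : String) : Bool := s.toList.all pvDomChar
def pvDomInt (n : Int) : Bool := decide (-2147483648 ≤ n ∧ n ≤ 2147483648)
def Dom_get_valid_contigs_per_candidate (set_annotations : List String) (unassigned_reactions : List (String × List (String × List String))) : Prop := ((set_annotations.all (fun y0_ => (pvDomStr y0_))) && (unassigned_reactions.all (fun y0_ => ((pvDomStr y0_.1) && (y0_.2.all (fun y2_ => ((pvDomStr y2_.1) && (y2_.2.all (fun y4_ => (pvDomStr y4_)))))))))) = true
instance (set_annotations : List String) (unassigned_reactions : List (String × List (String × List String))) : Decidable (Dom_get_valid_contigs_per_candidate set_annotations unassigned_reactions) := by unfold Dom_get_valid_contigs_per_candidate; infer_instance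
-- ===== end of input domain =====

-- B inverts the computation: an inverted index annotation→contigs, the union of the flagged
-- buckets as one 'invalid' set, and the contigs outside it (objective: alternative algorithm).

-- ===== PORT A =====
-- for contig_id in unassigned_reactions: flag starts True; every annotation of every seq is
-- tested against set_annotations and may set the flag False; contigs with a surviving flag
-- are added to the result set (PySem.Set in insertion order).
def get_valid_contigs_per_candidate (set_annotations : List String) (unassigned_reactions : List (String × List (String × List String))) : List String :=
  unassigned_reactions.foldl (fun valid_contigs p =>
    let valid_contig := p.2.foldl (fun v q =>
      q.2.foldl (fun v id_type_annot_id =>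
        if set_annotations.contains id_type_annot_id then false else v) v) true
    if valid_contig then PySem.Set.add valid_contigs p.1 else valid_contigs) PySem.Set.empty

-- ===== PORT B =====
-- index.setdefault(a, set()).add(contig_id) = Dict.modify a [] (Set.add · contig_id);
-- invalid.update(index.get(a, ())) = Set.update; the final set comprehension keeps the
-- contigs whose id is not in invalid.
def get_valid_contigs_per_candidate_alt (set_annotations : List String) (unassigned_reactions : List (String × List (String × List String))) : List String :=
  let index := unassigned_reactions.foldl (fun idx p =>
    p.2.foldl (fun idx q =>
      q.2.foldl (fun idx a => idx.modify a ([] : List String) (fun s => PySem.Set.add s p.1)) idx) idx)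
    PySem.Dict.empty
  let invalid := set_annotations.foldl (fun inv a => PySem.Set.update inv (index.getD a [])) PySem.Set.empty
  unassigned_reactions.foldl (fun acc p =>
    if PySem.Set.contains invalid p.1 then acc else PySem.Set.add acc p.1) PySem.Set.empty

-- ===== PRECONDITION & SPEC =====
-- Pre_ excludes association lists with duplicate contig ids: a Python dict cannot carry
-- duplicate keys, so those inputs never arise from the Python programs; on them the
-- assoc-list representations of A and B may disagree.
def Pre_get_valid_contigs_per_candidate (set_annotations : List String) (unassigned_reactions : List (String × List (String × List String))) : Prop :=
  (unassigned_reactions.map Prod.fst).Nodup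
instance (set_annotations : List String) (unassigned_reactions : List (String × List (String × List String))) : Decidable (Pre_get_valid_contigs_per_candidate set_annotations unassigned_reactions) := by unfold Pre_get_valid_contigs_per_candidate; infer_instance

def pvWitness_get_valid_contigs_per_candidate : List String × (List (String × List (String × List String))) :=
  (["a", "b"], [("c1", [("s1", ["a", "x"])]), ("c2", [("s2", ["y"]), ("s3", [])])])

def Spec_get_valid_contigs_per_candidate (set_annotations : List String) (unassigned_reactions : List (String × List (String × List String))) (out : List String) : Prop := out = get_valid_contigs_per_candidate_alt set_annotations unassigned_reactions
instance (set_annotations : List String) (unassigned_reactions : List (String × List (String × List String))) (out : List String) : Decidable (Spec_get_valid_contigs_per_candidate set_annotations unassigned_reactions out) := by unfold Spec_get_valid_contigs_per_candidate; infer_instance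

-- ===== CLAIM (what is proved, stated in full; the proofs are below) =====
def Claim_equal_get_valid_contigs_per_candidate : Prop := ∀ (set_annotations : List String) (unassigned_reactions : List (String × List (String × List String))), Dom_get_valid_contigs_per_candidate set_annotations unassigned_reactions → Pre_get_valid_contigs_per_candidate set_annotations unassigned_reactions → Spec_get_valid_contigs_per_candidate set_annotations unassigned_reactions (get_valid_contigs_per_candidate set_annotations unassigned_reactions)

-- ===== LEMMAS AND PROOFS =====

-- A's innermost flag fold is 'v && all annotations absent'.
theorem pv_flag_fold (sa : List String) (l : List String) (v : Bool) :
    l.foldl (fun v a => if sa.contains a then false else v) v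
      = (v && l.all (fun a => !sa.contains a)) := by
  induction l generalizing v with
  | nil => simp
  | cons x xs ih =>
    rw [List.foldl_cons, ih, List.all_cons]
    cases v <;> simp

-- A's per-contig flag is 'every annotation of this contig is absent from set_annotations'.
theorem pv_flag_eq (sa : List String) (seqs : List (String × List String)) :
    seqs.foldl (fun v q =>
        q.2.foldl (fun v a => if sa.contains a then false else v) v) true
      = ((seqs.map Prod.snd).flatten).all (fun a => !sa.contains a) := by
  have hall : ∀ v, seqs.foldl (fun v q =>
      q.2.foldl (fun v a => if sa.contains a then false else v) v) v
      = (v && ((seqs.map Prod.snd).flatten).all (fun a => !sa.contains a)) := by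
    induction seqs with
    | nil => intro v; simp
    | cons q qs ih =>
      intro v
      rw [List.foldl_cons, pv_flag_fold, ih]
      simp [Bool.and_assoc]
  rw [hall, Bool.true_and]

-- bucket membership through one contig's annotation loop (a flat list of annotations)
theorem pv_idx_flat (c : String) (l : List String) (idx : PySem.Dict String (List String))
    (b x : String) :
    x ∈ (l.foldl (fun idx a => idx.modify a ([] : List String) (fun s => PySem.Set.add s c)) idx).getD b []
      ↔ x ∈ idx.getD b [] ∨ (x = c ∧ b ∈ l) := by
  induction l generalizing idx with
  | nil => simp
  | cons a as ih =>
    rw [List.foldl_cons, ih, PySem.Dict.getD_modify]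
    by_cases hba : b = a
    · subst hba
      simp [PySem.Set.mem_add]
      tauto
    · simp [hba]

-- the inner double fold over seqs is the fold over the flattened annotation list
theorem pv_idx_inner (c : String) (seqs : List (String × List String))
    (idx : PySem.Dict String (List String)) :
    seqs.foldl (fun idx q =>
        q.2.foldl (fun idx a => idx.modify a ([] : List String) (fun s => PySem.Set.add s c)) idx) idx
      = ((seqs.map Prod.snd).flatten).foldl
          (fun idx a => idx.modify a ([] : List String) (fun s => PySem.Set.add s c)) idx := by
  rw [List.foldl_flatten, List.foldl_map]

-- bucket membership in the final index: x is in bucket b iff some entry of ur has key x and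
-- carries annotation b.
theorem pv_idx_spec (ur : List (String × List (String × List String)))
    (idx : PySem.Dict String (List String)) (b x : String) :
    x ∈ (ur.foldl (fun idx p =>
        p.2.foldl (fun idx q =>
          q.2.foldl (fun idx a => idx.modify a ([] : List String) (fun s => PySem.Set.add s p.1)) idx) idx) idx).getD b []
      ↔ x ∈ idx.getD b [] ∨ ∃ p ∈ ur, p.1 = x ∧ b ∈ (p.2.map Prod.snd).flatten := by
  induction ur generalizing idx with
  | nil => simp
  | cons p ps ih =>
    rw [List.foldl_cons, ih, pv_idx_inner, pv_idx_flat]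
    constructor
    · rintro ((h | ⟨hx, hb⟩) | ⟨q, hq, hqx, hqb⟩)
      · exact Or.inl h
      · exact Or.inr ⟨p, List.mem_cons_self, hx.symm, hb⟩
      · exact Or.inr ⟨q, List.mem_cons_of_mem _ hq, hqx, hqb⟩
    · rintro (h | ⟨q, hq, hqx, hqb⟩)
      · exact Or.inl (Or.inl h)
      · rcases List.mem_cons.mp hq with rfl | hq'
        · exact Or.inl (Or.inr ⟨hqx.symm, hqb⟩)
        · exact Or.inr ⟨q, hq', hqx, hqb⟩

-- membership in the union of the looked-up buckets
theorem pv_invalid_spec (sa : List String) (idx : PySem.Dict String (List String))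
    (inv : List String) (x : String) :
    x ∈ sa.foldl (fun inv a => PySem.Set.update inv (idx.getD a [])) inv
      ↔ x ∈ inv ∨ ∃ a ∈ sa, x ∈ idx.getD a [] := by
  induction sa generalizing inv with
  | nil => simp
  | cons a as ih =>
    rw [List.foldl_cons, ih]
    simp [PySem.Set.mem_update]
    tauto

-- ===== VERDICT (by name: the statement is the Claim_ definition above) =====
theorem get_valid_contigs_per_candidate_spec : Claim_equal_get_valid_contigs_per_candidate := by
  intro sa ur _ hpre
  have hnd : (ur.map Prod.fst).Nodup := hpre
  unfold Spec_get_valid_contigs_per_candidate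
  unfold get_valid_contigs_per_candidate get_valid_contigs_per_candidate_alt
  dsimp only
  apply PySem.List.foldl_congr_mem
  intro acc p hp
  rw [pv_flag_eq]
  have hmem : PySem.Set.contains
      (sa.foldl (fun inv a =>
        PySem.Set.update inv ((ur.foldl (fun idx p =>
          p.2.foldl (fun idx q =>
            q.2.foldl (fun idx a => idx.modify a ([] : List String) (fun s => PySem.Set.add s p.1)) idx) idx)
          PySem.Dict.empty).getD a [])) PySem.Set.empty) p.1
      = !((p.2.map Prod.snd).flatten).all (fun a => !sa.contains a) := by
    by_cases h : ∃ a ∈ (p.2.map Prod.snd).flatten, a ∈ sa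
    · obtain ⟨a, ha, hsa⟩ := h
      have h2 : ((p.2.map Prod.snd).flatten).all (fun a => !sa.contains a) = false := by
        rw [List.all_eq_false]
        exact ⟨a, ha, by simp [hsa]⟩
      rw [h2, Bool.not_false, PySem.Set.contains_iff, pv_invalid_spec]
      refine Or.inr ⟨a, hsa, ?_⟩
      rw [pv_idx_spec]
      exact Or.inr ⟨p, hp, rfl, ha⟩
    · push_neg at h
      have h2 : ((p.2.map Prod.snd).flatten).all (fun a => !sa.contains a) = true := by
        rw [List.all_eq_true]
        intro a ha
        simp [h a ha]
      rw [h2, Bool.not_true, Bool.eq_false_iff]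
      intro hcon
      rw [PySem.Set.contains_iff, pv_invalid_spec] at hcon
      rcases hcon with hemp | ⟨a, hasa, hbucket⟩
      · simp [PySem.Set.empty] at hemp
      · rw [pv_idx_spec] at hbucket
        rcases hbucket with hemp | ⟨q, hq, hqx, hqb⟩
        · simp [PySem.Dict.getD_empty] at hemp
        · -- nodup keys: q and p share the key p.1, so q = p
          have hqp : q = p := List.inj_on_of_nodup_map hnd hq hp hqx
          subst hqp
          exact h a hqb hasa
  rw [hmem]
  cases hb : ((p.2.map Prod.snd).flatten).all (fun a => !sa.contains a) <;> simp
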